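-- pv_equiv track=rewrite | github.com/NobuyukiInoue/LeetCode | Problems/0720_Longest_Word_in_Dictionary/Project_Python3/Longest_Word_in_Dictionary.py | longestWord3
-- ===== SOURCE A (Python) =====
-- def longestWord3(words):
--     buckets = [[] for _ in range(30)]
--     for word in words:
--         buckets[len(word) - 1].append(word)
--     prev, cur, ans = {''}, set(), ''
--     for bucket in buckets:
--         for word in bucket:
--             if word[:-1] in prev:
--                 cur.add(word)
--                 if len(ans) < len(word) or (len(ans) == len(word) and word < ans):
--                     ans = word
--         prev, cur = cur, set()
--     return ans
-- ===== SOURCE B (Python) =====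
-- def longestWord3(words):
--     built = {''}
--     ans = ''
--     for word in sorted(words):
--         if word[:-1] in built:
--             built.add(word)
--             if len(ans) < len(word):
--                 ans = word
--     return ans
-- ===== Notes on version B (the rewrite author's own statement) =====
-- stated objective: simpler
-- what changed: Replaces the fixed 30-slot length-bucket table and the layered prev/cur sets with one lexicographic sort and a single pass over sorted(words) maintaining one cumulative set of buildable words (a proper prefix sorts strictly before its extension, so one set suffices).
import Mathlib
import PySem

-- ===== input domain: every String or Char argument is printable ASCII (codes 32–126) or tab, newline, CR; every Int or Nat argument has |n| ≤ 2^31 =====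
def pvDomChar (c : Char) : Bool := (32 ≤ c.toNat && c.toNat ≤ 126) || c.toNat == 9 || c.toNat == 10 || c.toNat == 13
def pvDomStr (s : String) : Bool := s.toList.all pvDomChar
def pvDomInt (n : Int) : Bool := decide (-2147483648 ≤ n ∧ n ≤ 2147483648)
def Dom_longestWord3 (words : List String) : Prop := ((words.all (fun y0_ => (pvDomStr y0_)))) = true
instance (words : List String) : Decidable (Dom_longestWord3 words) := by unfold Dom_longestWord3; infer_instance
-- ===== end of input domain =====

-- B replaces A's fixed 30-slot length-bucket table and layered prev/cur sets by one pass over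
-- sorted(words) with a single cumulative set (simpler decomposition; not claimed faster).

-- ===== PORT A =====
-- word[:-1]
def pvDropLast (w : String) : String := PySem.Str.slice w none (some (-1))

-- buckets[i].append(word): Python index resolution (negative wraps), exact for in-range i;
-- out-of-range i (IndexError in Python) is excluded by Pre_longestWord3
def pvBucketPut (bs : List (List String)) (i : Int) (w : String) : List (List String) :=
  if 0 ≤ (if i < 0 then i + bs.length else i) ∧ (if i < 0 then i + bs.length else i) < bs.length
  then bs.set (if i < 0 then i + bs.length else i).toNat
      (bs.getD (if i < 0 then i + bs.length else i).toNat [] ++ [w])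
  else bs

-- body of A's inner loop over one bucket (state: (cur, ans)); 'word < ans' is Python's
-- code-point-lexicographic string comparison, ported as '<' on the code-point lists
def pvAStep (prev : PySem.Set String) (ca : PySem.Set String × String) (w : String) :
    PySem.Set String × String :=
  if PySem.Set.contains prev (pvDropLast w) then
    (PySem.Set.add ca.1 w,
     if PySem.Str.len ca.2 < PySem.Str.len w ∨
        (PySem.Str.len ca.2 = PySem.Str.len w ∧ w.toList < ca.2.toList) then w else ca.2)
  else ca

def longestWord3 (words : List String) : String :=
  ((words.foldl (fun bs w => pvBucketPut bs (PySem.Str.len w - 1) w)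
      (List.replicate 30 ([] : List String))).foldl
    (fun (st : PySem.Set String × PySem.Set String × String) bucket =>
      let res := bucket.foldl (pvAStep st.1) (st.2.1, st.2.2)
      (res.1, PySem.Set.empty, res.2))
    (PySem.Set.ofList [""], PySem.Set.empty, "")).2.2

-- ===== PORT B =====
-- body of B's single loop (state: (built, ans))
def pvBStep (st : PySem.Set String × String) (w : String) : PySem.Set String × String :=
  if PySem.Set.contains st.1 (pvDropLast w) then
    (PySem.Set.add st.1 w,
     if PySem.Str.len st.2 < PySem.Str.len w then w else st.2)
  else st

-- sorted(words): Python sorts strings by code points, ported as sort with key = code-point list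
-- (the order instances on List Char are pinned to the LinearOrder ones so the PySem sort
-- lemmas apply literally; they decide exactly the same code-point-lexicographic order)
def sortedW (words : List String) : List String :=
  @PySem.List.sorted String (List Char)
    (@Preorder.toLT (List Char) (@PartialOrder.toPreorder (List Char)
      (@LinearOrder.toPartialOrder (List Char) (@List.instLinearOrder Char instLinearOrderChar))))
    (@LinearOrder.toDecidableLT (List Char) (@List.instLinearOrder Char instLinearOrderChar))
    words (fun w => w.toList) false

def longestWord3_alt (words : List String) : String :=
  ((sortedW words).foldl pvBStep (PySem.Set.ofList [""], "")).2

-- ===== PRECONDITION & SPEC =====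
-- A indexes a fixed 30-slot table with len(word)-1 and raises IndexError for any word longer
-- than 30 characters; Pre_ excludes exactly those inputs (len(word)=0 wraps to slot 29 and returns).
def Pre_longestWord3 (words : List String) : Prop := ∀ w ∈ words, w.toList.length ≤ 30
instance (words : List String) : Decidable (Pre_longestWord3 words) := by
  unfold Pre_longestWord3; infer_instance
def pvWitness_longestWord3 : List String := ["ab", "a", "b"]

def Spec_longestWord3 (words : List String) (out : String) : Prop := out = longestWord3_alt words
instance (words : List String) (out : String) : Decidable (Spec_longestWord3 words out) := by
  unfold Spec_longestWord3; infer_instance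

-- ===== CLAIM (what is proved, stated in full; the proofs are below) =====
def Claim_equal_longestWord3 : Prop := ∀ (words : List String), Dom_longestWord3 words →
  Pre_longestWord3 words → Spec_longestWord3 words (longestWord3 words)
-- ===== LEMMAS AND PROOFS =====

-- character count of a string
def lenN (w : String) : Nat := w.toList.length

-- the buildable-word predicate both programs compute: a nonempty word is good iff it occurs in
-- ws and its word[:-1] is good; the empty character list is good
def good (ws : List String) : List Char → Bool
  | [] => true
  | c :: cs => ws.any (fun x => x.toList == c :: cs) && good ws ((c :: cs).dropLast)
termination_by l => l.length
decreasing_by simp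

-- effective filter of A's inner check, and of B's check
def pAb (ws : List String) (w : String) : Bool := !w.toList.isEmpty && good ws w.toList
def pBb (ws : List String) (w : String) : Bool := good ws w.toList.dropLast

-- the bucket slot a word of length ≤ 30 lands in ('' wraps to slot 29)
def bIdx (w : String) : Nat := if w.toList.length = 0 then 29 else w.toList.length - 1
def fB (ws : List String) (n : Nat) : List String := ws.filter (fun w => bIdx w == n)
def LA (ws : List String) (n : Nat) : List String :=
  (List.range n).flatMap (fun k => (fB ws k).filter (pAb ws))

-- "x is a strictly better answer than r": longer, or same length and lexicographically smaller
abbrev Btr (x r : String) : Prop := lenN r < lenN x ∨ (lenN x = lenN r ∧ x.toList < r.toList)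

def updA (a w : String) : String := if Btr w a then w else a
def FA (l : List String) (a : String) : String := l.foldl updA a
def GB (p : String → Bool) (l : List String) (a : String) : String :=
  l.foldl (fun a w => if p w then (if lenN a < lenN w then w else a) else a) a

-- membership characterization of A's prev set before bucket n
def Mpred (ws : List String) (n : Nat) (u : String) : Prop :=
  (n = 0 ∧ u = "") ∨ (u ∈ ws ∧ lenN u = n ∧ 1 ≤ n ∧ good ws u.toList = true)

-- both results land in this set, on which Btr-minimality pins them down
def GoodW (ws : List String) (u : String) : Prop :=
  u = "" ∨ (u ∈ ws ∧ good ws u.toList = true)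

-- ---------- string basics ----------

theorem toList_pvDropLast (w : String) : (pvDropLast w).toList = w.toList.dropLast :=
  PySem.Str.slice_to_neg_one w

theorem eq_empty_of_toList_nil {w : String} (h : w.toList = []) : w = "" :=
  String.toList_inj.mp (by simp [h])

theorem toList_ne_nil_of_ne_empty {w : String} (h : w ≠ "") : w.toList ≠ [] :=
  fun hn => h (eq_empty_of_toList_nil hn)

theorem dropLast_lt_self (l : List Char) (h : l ≠ []) : l.dropLast < l := by
  induction l with
  | nil => simp at h
  | cons a t ih =>
    cases t with
    | nil => simp
    | cons b u =>
      rw [List.dropLast_cons₂, List.cons_lt_cons_iff]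
      exact Or.inr ⟨rfl, ih (by simp)⟩

theorem bool_eq_of_iff {a b : Bool} (h : a = true ↔ b = true) : a = b := by
  cases a <;> cases b <;> simp_all

theorem sortedW_pairwise (ws : List String) :
    (sortedW ws).Pairwise (fun a b => a.toList ≤ b.toList) :=
  PySem.List.sorted_pairwise ws (fun w => w.toList)

theorem mem_sortedW (ws : List String) (x : String) : x ∈ sortedW ws ↔ x ∈ ws :=
  @PySem.List.mem_sorted String (List Char)
    (@Preorder.toLT (List Char) (@PartialOrder.toPreorder (List Char)
      (@LinearOrder.toPartialOrder (List Char) (@List.instLinearOrder Char instLinearOrderChar))))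
    (@LinearOrder.toDecidableLT (List Char) (@List.instLinearOrder Char instLinearOrderChar))
    ws (fun w => w.toList) false x

-- ---------- Btr is a strict linear order ----------

theorem Btr_irrefl (x : String) : ¬ Btr x x := by
  rintro (h | ⟨_, h⟩)
  · omega
  · exact lt_irrefl _ h

theorem Btr_trans {x y z : String} (h1 : Btr x y) (h2 : Btr y z) : Btr x z := by
  rcases h1 with h1 | ⟨h1a, h1b⟩ <;> rcases h2 with h2 | ⟨h2a, h2b⟩
  · exact Or.inl (by omega)
  · exact Or.inl (by omega)
  · exact Or.inl (by omega)
  · exact Or.inr ⟨by omega, lt_trans h1b h2b⟩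

theorem Btr_conn {x y : String} (h1 : ¬ Btr x y) (h2 : ¬ Btr y x) : x = y := by
  have hl : lenN x = lenN y := by
    by_contra hne
    rcases Nat.lt_or_ge (lenN x) (lenN y) with h | h
    · exact h2 (Or.inl h)
    · exact h1 (Or.inl (lt_of_le_of_ne h (fun e => hne e.symm)))
  have hxy : ¬ x.toList < y.toList := fun hlt => h1 (Or.inr ⟨hl, hlt⟩)
  have hyx : ¬ y.toList < x.toList := fun hlt => h2 (Or.inr ⟨hl.symm, hlt⟩)
  exact String.toList_inj.mp (le_antisymm (not_lt.mp hyx) (not_lt.mp hxy))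

theorem not_Btr_empty (r : String) : ¬ Btr "" r := by
  rintro (h | ⟨h1, h2⟩)
  · simp [lenN] at h
  · have hr : r.toList = [] := List.length_eq_zero_iff.mp (by simpa [lenN] using h1.symm)
    rw [hr] at h2
    exact List.not_lt_nil _ h2

-- ---------- FA: fold with a strict-total-order update, over any order ----------

theorem FA_cons (w : String) (t : List String) (a : String) :
    FA (w :: t) a = FA t (updA a w) := rfl

theorem updA_pos {a w : String} (h : Btr w a) : updA a w = w := by
  unfold updA; rw [if_pos h]

theorem updA_neg {a w : String} (h : ¬ Btr w a) : updA a w = a := by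
  unfold updA; rw [if_neg h]

theorem FA_mem (l : List String) (a : String) : FA l a = a ∨ FA l a ∈ l := by
  induction l generalizing a with
  | nil => exact Or.inl rfl
  | cons w t ih =>
    rw [FA_cons]
    by_cases hb : Btr w a
    · rw [updA_pos hb]
      rcases ih w with h | h
      · exact Or.inr (by rw [h]; exact List.mem_cons_self)
      · exact Or.inr (List.mem_cons_of_mem _ h)
    · rw [updA_neg hb]
      rcases ih a with h | h
      · exact Or.inl h
      · exact Or.inr (List.mem_cons_of_mem _ h)

theorem FA_self_or_better (l : List String) (a : String) : FA l a = a ∨ Btr (FA l a) a := by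
  induction l generalizing a with
  | nil => exact Or.inl rfl
  | cons w t ih =>
    rw [FA_cons]
    by_cases hb : Btr w a
    · rw [updA_pos hb]
      rcases ih w with h | h
      · exact Or.inr (by rw [h]; exact hb)
      · exact Or.inr (Btr_trans h hb)
    · rw [updA_neg hb]
      exact ih a

theorem FA_not_better (l : List String) (a : String) :
    ∀ x, (x ∈ l ∨ x = a) → ¬ Btr x (FA l a) := by
  induction l generalizing a with
  | nil =>
    rintro x (hx | rfl)
    · cases hx
    · exact Btr_irrefl x
  | cons w t ih =>
    rintro x hx
    rw [FA_cons]
    by_cases hb : Btr w a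
    · rw [updA_pos hb]
      rcases hx with hx | hxa
      · rcases List.mem_cons.mp hx with hxw | hx
        · rw [hxw]
          exact ih w w (Or.inr rfl)
        · exact ih w x (Or.inl hx)
      · subst hxa
        intro hcontra
        rcases FA_self_or_better t w with h2 | h2
        · rw [h2] at hcontra
          exact Btr_irrefl x (Btr_trans hcontra hb)
        · exact Btr_irrefl x (Btr_trans (Btr_trans hcontra h2) hb)
    · rw [updA_neg hb]
      rcases hx with hx | hxa
      · rcases List.mem_cons.mp hx with hxw | hx
        · intro hcontra
          rcases FA_self_or_better t a with h2 | h2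
          · rw [h2] at hcontra
            exact hb (hxw ▸ hcontra)
          · exact hb (hxw ▸ Btr_trans hcontra h2)
        · exact ih a x (Or.inl hx)
      · exact ih a x (Or.inr hxa)

-- ---------- GB: fold with the length-only update, over a sorted order ----------

theorem GB_cons (p : String → Bool) (w : String) (t : List String) (a : String) :
    GB p (w :: t) a = GB p t (if p w = true then (if lenN a < lenN w then w else a) else a) :=
  rfl

theorem GB_mem (p : String → Bool) (l : List String) (a : String) :
    GB p l a = a ∨ (GB p l a ∈ l ∧ p (GB p l a) = true) := by
  induction l generalizing a with
  | nil => exact Or.inl rfl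
  | cons w t ih =>
    rw [GB_cons]
    by_cases hp : p w = true
    · by_cases hl : lenN a < lenN w
      · rw [if_pos hp, if_pos hl]
        rcases ih w with h | ⟨h1, h2⟩
        · exact Or.inr ⟨by rw [h]; exact List.mem_cons_self, by rw [h]; exact hp⟩
        · exact Or.inr ⟨List.mem_cons_of_mem _ h1, h2⟩
      · rw [if_pos hp, if_neg hl]
        rcases ih a with h | ⟨h1, h2⟩
        · exact Or.inl h
        · exact Or.inr ⟨List.mem_cons_of_mem _ h1, h2⟩
    · rw [if_neg hp]
      rcases ih a with h | ⟨h1, h2⟩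
      · exact Or.inl h
      · exact Or.inr ⟨List.mem_cons_of_mem _ h1, h2⟩

theorem GB_len (p : String → Bool) (l : List String) (a : String) :
    GB p l a = a ∨ lenN a < lenN (GB p l a) := by
  induction l generalizing a with
  | nil => exact Or.inl rfl
  | cons w t ih =>
    rw [GB_cons]
    by_cases hp : p w = true
    · by_cases hl : lenN a < lenN w
      · rw [if_pos hp, if_pos hl]
        rcases ih w with h | h
        · exact Or.inr (by rw [h]; exact hl)
        · exact Or.inr (lt_trans hl h)
      · rw [if_pos hp, if_neg hl]
        exact ih a
    · rw [if_neg hp]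
      exact ih a

theorem GB_le_len (p : String → Bool) (l : List String) (a : String) :
    lenN a ≤ lenN (GB p l a) := by
  rcases GB_len p l a with h | h
  · rw [h]
  · exact le_of_lt h

theorem GB_maxlen (p : String → Bool) (l : List String) (a : String) :
    ∀ x ∈ l, p x = true → lenN x ≤ lenN (GB p l a) := by
  induction l generalizing a with
  | nil => intro x h; cases h
  | cons w t ih =>
    intro x hx hp'
    rw [GB_cons]
    rcases List.mem_cons.mp hx with hxw | hx
    · rw [hxw] at hp' ⊢
      by_cases hl : lenN a < lenN w
      · rw [if_pos hp', if_pos hl]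
        exact GB_le_len p t w
      · rw [if_pos hp', if_neg hl]
        exact le_trans (not_lt.mp hl) (GB_le_len p t a)
    · by_cases hp2 : p w = true
      · by_cases hl : lenN a < lenN w
        · rw [if_pos hp2, if_pos hl]
          exact ih w x hx hp'
        · rw [if_pos hp2, if_neg hl]
          exact ih a x hx hp'
      · rw [if_neg hp2]
        exact ih a x hx hp'

theorem GB_lexmin (p : String → Bool) (l : List String) (a : String)
    (hs : l.Pairwise (fun x y => x.toList ≤ y.toList))
    (ha : ∀ x ∈ l, p x = true → lenN x = lenN a → ¬ x.toList < a.toList) :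
    ∀ x ∈ l, p x = true → lenN x = lenN (GB p l a) → ¬ x.toList < (GB p l a).toList := by
  induction l generalizing a with
  | nil => intro x h; cases h
  | cons w t ih =>
    rcases List.pairwise_cons.mp hs with ⟨hw, hst⟩
    intro x hx hp'
    rw [GB_cons]
    rcases List.mem_cons.mp hx with hxw | hx
    · rw [hxw] at hp' ⊢
      by_cases hl : lenN a < lenN w
      · rw [if_pos hp', if_pos hl]
        intro hlen
        rcases GB_len p t w with h | h
        · rw [h]
          exact lt_irrefl _
        · exact absurd hlen (by omega)
      · rw [if_pos hp', if_neg hl]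
        intro hlen
        rcases GB_len p t a with h | h
        · rw [h]
          rw [h] at hlen
          exact ha w List.mem_cons_self hp' hlen
        · have h2 := not_lt.mp hl
          exact absurd hlen (by omega)
    · by_cases hp2 : p w = true
      · by_cases hl : lenN a < lenN w
        · rw [if_pos hp2, if_pos hl]
          exact ih w hst (fun y hy _ _ => not_lt.mpr (hw y hy)) x hx hp'
        · rw [if_pos hp2, if_neg hl]
          exact ih a hst
            (fun y hy hpy hly => ha y (List.mem_cons_of_mem _ hy) hpy hly) x hx hp'
      · rw [if_neg hp2]
        exact ih a hst
          (fun y hy hpy hly => ha y (List.mem_cons_of_mem _ hy) hpy hly) x hx hp'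

-- ---------- membership in a conditional fold of Set.add ----------

theorem mem_foldl_add_if (q : String → Bool) (l : List String) (s : PySem.Set String)
    (u : String) :
    (u ∈ l.foldl (fun c w => if q w then PySem.Set.add c w else c) s) ↔
      u ∈ s ∨ u ∈ l.filter q := by
  induction l generalizing s with
  | nil => simp
  | cons w t ih =>
    rw [List.foldl_cons, ih, List.filter_cons]
    by_cases hq : q w = true
    · simp only [hq, if_pos, PySem.Set.mem_add, List.mem_cons]
      tauto
    · simp only [hq, Bool.false_eq_true, if_false]

-- ---------- the bucket-building pass ----------

theorem pvBucketPut_eq (bs : List (List String)) (w : String) (hlen : bs.length = 30)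
    (hw : lenN w ≤ 30) :
    pvBucketPut bs (PySem.Str.len w - 1) w = bs.set (bIdx w) (bs.getD (bIdx w) [] ++ [w]) := by
  unfold lenN at hw
  unfold pvBucketPut bIdx
  rw [PySem.Str.len_eq, hlen]
  by_cases h0 : w.toList.length = 0
  · have hneg : (w.toList.length : Int) - 1 < 0 := by omega
    rw [if_pos hneg]
    have hin : (0 : Int) ≤ (w.toList.length : Int) - 1 + ((30 : Nat) : Int) ∧
        (w.toList.length : Int) - 1 + ((30 : Nat) : Int) < ((30 : Nat) : Int) := by omega
    rw [if_pos hin]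
    have hto : ((w.toList.length : Int) - 1 + ((30 : Nat) : Int)).toNat = 29 := by omega
    rw [hto, if_pos h0]
  · have hneg : ¬ ((w.toList.length : Int) - 1 < 0) := by omega
    rw [if_neg hneg]
    have hin : (0 : Int) ≤ (w.toList.length : Int) - 1 ∧
        (w.toList.length : Int) - 1 < ((30 : Nat) : Int) := by omega
    rw [if_pos hin]
    have hto : ((w.toList.length : Int) - 1).toNat = w.toList.length - 1 := by omega
    rw [hto, if_neg h0]

theorem bput_fold (ws : List String) (hpre : ∀ w ∈ ws, lenN w ≤ 30) :
    ∀ bs : List (List String), bs.length = 30 →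
      ws.foldl (fun bs w => pvBucketPut bs (PySem.Str.len w - 1) w) bs
        = (List.range 30).map (fun n => bs.getD n [] ++ fB ws n) := by
  induction ws with
  | nil =>
    intro bs hlen
    apply List.ext_getElem (by simp [hlen])
    intro i h1 h2
    have hi : i < bs.length := by simpa using h1
    simp only [List.getElem_map, List.getElem_range, fB, List.filter_nil, List.append_nil,
      List.foldl_nil]
    rw [List.getD_eq_getElem?_getD, List.getElem?_eq_getElem hi]
    rfl
  | cons w t ih =>
    intro bs hlen
    have hw : lenN w ≤ 30 := hpre w List.mem_cons_self
    have ht : ∀ x ∈ t, lenN x ≤ 30 := fun x hx => hpre x (List.mem_cons_of_mem _ hx)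
    rw [List.foldl_cons, pvBucketPut_eq bs w hlen hw,
      ih ht _ (by rw [List.length_set]; exact hlen)]
    apply List.ext_getElem (by simp)
    intro i h1 h2
    have hi : i < 30 := by simpa using h1
    have hbIdx : bIdx w < 30 := by
      have hw' := hw
      unfold lenN at hw'
      unfold bIdx
      split <;> omega
    simp only [List.getElem_map, List.getElem_range]
    have hset : (bs.set (bIdx w) (bs.getD (bIdx w) [] ++ [w])).getD i []
        = if bIdx w = i then bs.getD (bIdx w) [] ++ [w] else bs.getD i [] := by
      rw [List.getD_eq_getElem?_getD, List.getElem?_set]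
      by_cases hbe : bIdx w = i
      · rw [if_pos hbe, if_pos (by omega : bIdx w < bs.length), if_pos hbe]
        rfl
      · rw [if_neg hbe, if_neg hbe, List.getD_eq_getElem?_getD]
    rw [hset]
    unfold fB
    rw [List.filter_cons]
    by_cases hbi : bIdx w = i
    · rw [if_pos hbi, if_pos (by simpa using hbi)]
      rw [hbi, List.append_assoc, List.singleton_append]
    · rw [if_neg hbi, if_neg (by simpa using hbi)]

-- ---------- A's per-bucket check equals the pure predicate ----------

theorem good_nonempty_iff (ws : List String) (c : Char) (cs : List Char) :
    good ws (c :: cs) = true ↔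
      (∃ x ∈ ws, x.toList = c :: cs) ∧ good ws ((c :: cs).dropLast) = true := by
  rw [good]
  simp [List.any_eq_true]

theorem mem_of_good {ws : List String} {u : String} (hne : u.toList ≠ [])
    (hg : good ws u.toList = true) : u ∈ ws := by
  rcases hu : u.toList with _ | ⟨c, cs⟩
  · exact absurd hu hne
  · rw [hu] at hg
    rcases (good_nonempty_iff ws c cs).mp hg with ⟨⟨x, hx, hxl⟩, _⟩
    have hxu : x = u := String.toList_inj.mp (by rw [hxl, hu])
    exact hxu ▸ hx

theorem check_eq (ws : List String) (n : Nat) (pv : PySem.Set String)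
    (hpv : ∀ u, u ∈ pv ↔ Mpred ws n u) (w : String) (hw : w ∈ fB ws n) :
    PySem.Set.contains pv (pvDropLast w) = pAb ws w := by
  rcases List.mem_filter.mp hw with ⟨hwm, hbi⟩
  have hbi : bIdx w = n := by simpa using hbi
  apply bool_eq_of_iff
  rw [PySem.Set.contains_iff, hpv]
  rcases hl : w.toList with _ | ⟨c, cs⟩
  · -- w = "": its check and pAb are both false
    have hd : pvDropLast w = "" := eq_empty_of_toList_nil (by rw [toList_pvDropLast, hl]; rfl)
    have hn : n = 29 := by
      unfold bIdx at hbi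
      rw [hl] at hbi
      simpa using hbi.symm
    rw [hd]
    constructor
    · rintro (⟨h, _⟩ | ⟨_, h, _⟩)
      · omega
      · exfalso
        unfold lenN at h
        have h0 : (0 : Nat) = n := by simpa using h
        omega
    · intro h
      exact absurd h (by simp [pAb, hl])
  · -- w nonempty, of length n+1
    have hlw : lenN w = n + 1 := by
      have hbi' := hbi
      unfold bIdx at hbi'
      rw [hl] at hbi'
      rw [if_neg (by simp)] at hbi'
      unfold lenN
      rw [hl]
      simp only [List.length_cons] at hbi' ⊢
      omega
    have hdl : (pvDropLast w).toList = (c :: cs).dropLast := by rw [toList_pvDropLast, hl]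
    have hdlen : lenN (pvDropLast w) = n := by
      unfold lenN
      rw [hdl]
      unfold lenN at hlw
      rw [hl] at hlw
      simp only [List.length_dropLast]
      omega
    have hpab : pAb ws w = good ws ((c :: cs).dropLast) := by
      unfold pAb
      rw [hl]
      simp only [List.isEmpty_cons, Bool.not_false, Bool.true_and]
      rw [good]
      have hany : ws.any (fun x => x.toList == c :: cs) = true := by
        simp only [List.any_eq_true, beq_iff_eq]
        exact ⟨w, hwm, hl⟩
      rw [hany, Bool.true_and]
    rw [hpab]
    by_cases hn0 : n = 0
    · subst hn0
      have hnil : (c :: cs).dropLast = [] := by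
        unfold lenN at hdlen
        rw [hdl] at hdlen
        exact List.length_eq_zero_iff.mp hdlen
      have hdc : pvDropLast w = "" := eq_empty_of_toList_nil (by rw [hdl, hnil])
      rw [hnil, hdc]
      simp [Mpred, good]
    · have hn1 : 1 ≤ n := by omega
      constructor
      · rintro (⟨h, _⟩ | ⟨_, _, _, hg⟩)
        · exact absurd h hn0
        · rw [hdl] at hg; exact hg
      · intro hg
        have hg' : good ws (pvDropLast w).toList = true := by rw [hdl]; exact hg
        have hne : (pvDropLast w).toList ≠ [] := by
          intro hnil
          unfold lenN at hdlen
          rw [hnil] at hdlen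
          simp at hdlen
          omega
        exact Or.inr ⟨mem_of_good hne hg', hdlen, hn1, hg'⟩

-- ---------- Port A reduces to FA over the good words ----------

theorem updPort_eq (a w : String) :
    (if PySem.Str.len a < PySem.Str.len w ∨
        (PySem.Str.len a = PySem.Str.len w ∧ w.toList < a.toList) then w else a) = updA a w := by
  unfold updA
  refine if_congr ?_ rfl rfl
  rw [PySem.Str.len_eq, PySem.Str.len_eq]
  show _ ↔ (lenN a < lenN w ∨ (lenN w = lenN a ∧ w.toList < a.toList))
  unfold lenN
  constructor
  · rintro (h | ⟨h1, h2⟩)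
    · exact Or.inl (by exact_mod_cast h)
    · exact Or.inr ⟨by exact_mod_cast h1.symm, h2⟩
  · rintro (h | ⟨h1, h2⟩)
    · exact Or.inl (by exact_mod_cast h)
    · exact Or.inr ⟨by exact_mod_cast h1.symm, h2⟩

theorem LA_succ (ws : List String) (n : Nat) :
    LA ws (n + 1) = LA ws n ++ (fB ws n).filter (pAb ws) := by
  unfold LA
  rw [List.range_succ, List.flatMap_append]
  simp

theorem outerA (ws : List String) :
    ∀ n : Nat, n ≤ 30 →
      ∃ pv : PySem.Set String,
        ((List.range n).map (fB ws)).foldl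
          (fun (st : PySem.Set String × PySem.Set String × String) bucket =>
            let res := bucket.foldl (pvAStep st.1) (st.2.1, st.2.2)
            (res.1, PySem.Set.empty, res.2))
          (PySem.Set.ofList [""], PySem.Set.empty, "")
        = (pv, PySem.Set.empty, FA (LA ws n) "")
        ∧ ∀ u, u ∈ pv ↔ Mpred ws n u := by
  intro n
  induction n with
  | zero =>
    intro _
    refine ⟨PySem.Set.ofList [""], by simp [LA, FA], ?_⟩
    intro u
    rw [PySem.Set.mem_ofList, List.mem_singleton]
    unfold Mpred
    constructor
    · intro h
      exact Or.inl ⟨rfl, h⟩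
    · rintro (⟨_, h⟩ | ⟨_, _, h, _⟩)
      · exact h
      · omega
  | succ n ih =>
    intro hn
    rcases ih (by omega) with ⟨pv, heq, hmem⟩
    have hcheck : ∀ w ∈ fB ws n, PySem.Set.contains pv (pvDropLast w) = pAb ws w :=
      fun w hw => check_eq ws n pv hmem w hw
    rw [List.range_succ, List.map_append, List.foldl_append, heq]
    simp only [List.map_cons, List.map_nil, List.foldl_cons, List.foldl_nil]
    have hfun : ∀ (ca : PySem.Set String × String) (w : String), pvAStep pv ca w =
        ((fun c w => if PySem.Set.contains pv (pvDropLast w) = true then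
            PySem.Set.add c w else c) ca.1 w,
         (fun y w => if PySem.Set.contains pv (pvDropLast w) = true then
            (if PySem.Str.len y < PySem.Str.len w ∨
               (PySem.Str.len y = PySem.Str.len w ∧ w.toList < y.toList) then w else y)
          else y) ca.2 w) := by
      intro ca w
      cases ca
      unfold pvAStep
      dsimp only
      split <;> rfl
    have hsplit : ∀ (b : List String) (s : PySem.Set String) (x : String),
        b.foldl (pvAStep pv) (s, x)
        = (b.foldl (fun c w => if PySem.Set.contains pv (pvDropLast w) = true then
              PySem.Set.add c w else c) s,
           b.foldl (fun y w => if PySem.Set.contains pv (pvDropLast w) = true then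
              (if PySem.Str.len y < PySem.Str.len w ∨
                 (PySem.Str.len y = PySem.Str.len w ∧ w.toList < y.toList) then w else y)
            else y) x) := by
      intro b s x
      rw [PySem.List.foldl_congr_mem b (pvAStep pv) _ (s, x) (fun acc w _ => hfun acc w),
        PySem.List.foldl_prod_mk
          (f := fun c w => if PySem.Set.contains pv (pvDropLast w) = true then
            PySem.Set.add c w else c)
          (g := fun y w => if PySem.Set.contains pv (pvDropLast w) = true then
            (if PySem.Str.len y < PySem.Str.len w ∨
               (PySem.Str.len y = PySem.Str.len w ∧ w.toList < y.toList) then w else y)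
          else y)]
    simp only [hsplit]
    have hans : (fB ws n).foldl
        (fun y w => if PySem.Set.contains pv (pvDropLast w) = true then
          (if PySem.Str.len y < PySem.Str.len w ∨
             (PySem.Str.len y = PySem.Str.len w ∧ w.toList < y.toList) then w else y)
         else y) (FA (LA ws n) "") = FA (LA ws (n + 1)) "" := by
      rw [PySem.List.foldl_congr_mem (fB ws n) _
        (fun y w => if pAb ws w = true then updA y w else y) (FA (LA ws n) "")
        (by
          intro acc w hw
          rw [hcheck w hw, updPort_eq])]
      rw [PySem.List.foldl_if_eq_foldl_filter (pAb ws) updA]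
      unfold FA
      rw [LA_succ, List.foldl_append]
    have hcur : ∀ u, (u ∈ (fB ws n).foldl
        (fun c w => if PySem.Set.contains pv (pvDropLast w) = true then
          PySem.Set.add c w else c) PySem.Set.empty) ↔ Mpred ws (n + 1) u := by
      intro u
      rw [mem_foldl_add_if (fun w => PySem.Set.contains pv (pvDropLast w))]
      have hempty : ¬ u ∈ (PySem.Set.empty : PySem.Set String) := by
        simp [PySem.Set.empty]
      constructor
      · rintro (h | h)
        · exact absurd h hempty
        · rcases List.mem_filter.mp h with ⟨hmem', hck⟩
          rw [hcheck u hmem'] at hck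
          rcases List.mem_filter.mp hmem' with ⟨hws, hbu⟩
          have hbu : bIdx u = n := by simpa using hbu
          unfold pAb at hck
          have hne : u.toList ≠ [] := by
            intro hnil
            rw [hnil] at hck
            simp at hck
          have hg : good ws u.toList = true := by
            rcases hck' : good ws u.toList
            · rw [hck'] at hck
              simp at hck
            · rfl
          have hlen : lenN u = n + 1 := by
            unfold bIdx at hbu
            unfold lenN
            have hne' : u.toList.length ≠ 0 := fun h => hne (List.length_eq_zero_iff.mp h)
            rw [if_neg hne'] at hbu
            omega
          exact Or.inr ⟨hws, hlen, by omega, hg⟩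
      · rintro (⟨h, _⟩ | ⟨hws, hlen, _, hg⟩)
        · omega
        · have hne : u.toList ≠ [] := by
            intro hnil
            unfold lenN at hlen
            rw [hnil] at hlen
            simp at hlen
          have hbu : bIdx u = n := by
            unfold bIdx
            have hne' : u.toList.length ≠ 0 := fun h => hne (List.length_eq_zero_iff.mp h)
            rw [if_neg hne']
            unfold lenN at hlen
            omega
          have hmem' : u ∈ fB ws n := List.mem_filter.mpr ⟨hws, by simpa using hbu⟩
          refine Or.inr (List.mem_filter.mpr ⟨hmem', ?_⟩)
          rw [hcheck u hmem']
          unfold pAb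
          rw [hg]
          simp [hne]
    refine ⟨_, ?_, hcur⟩
    rw [hans]

theorem A_eq (ws : List String) (hpre : ∀ w ∈ ws, lenN w ≤ 30) :
    longestWord3 ws = FA (LA ws 30) "" := by
  unfold longestWord3
  rw [bput_fold ws hpre (List.replicate 30 []) (by simp)]
  have hgetD : ∀ n : Nat, (List.replicate 30 ([] : List String)).getD n [] = [] := by
    intro n
    rw [List.getD_eq_getElem?_getD]
    rcases lt_or_ge n 30 with h | h
    · rw [List.getElem?_eq_getElem (by simpa using h), List.getElem_replicate]
      rfl
    · rw [List.getElem?_eq_none (by simpa using h)]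
      rfl
  have hmap : ((List.range 30).map
        fun n => (List.replicate 30 ([] : List String)).getD n [] ++ fB ws n)
      = (List.range 30).map (fB ws) := by
    apply List.map_congr_left
    intro n _
    rw [hgetD n, List.nil_append]
  rw [hmap]
  rcases outerA ws 30 (le_refl 30) with ⟨pv, heq, _⟩
  rw [heq]

theorem mem_LA30 (ws : List String) (hpre : ∀ w ∈ ws, lenN w ≤ 30) (u : String) :
    u ∈ LA ws 30 ↔ u ∈ ws ∧ pAb ws u = true := by
  unfold LA fB
  simp only [List.mem_flatMap, List.mem_range, List.mem_filter, beq_iff_eq]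
  constructor
  · rintro ⟨k, _, ⟨⟨hws, _⟩, hp⟩⟩
    exact ⟨hws, hp⟩
  · rintro ⟨hws, hp⟩
    refine ⟨bIdx u, ?_, ⟨⟨hws, rfl⟩, hp⟩⟩
    have := hpre u hws
    unfold bIdx lenN at *
    split <;> omega

-- ---------- Port B reduces to GB over sorted words ----------

theorem Bfold (ws : List String) :
    ∀ (l proc : List String) (built : PySem.Set String) (a : String),
      sortedW ws = proc ++ l →
      (∀ u : String, u ∈ built ↔ (u = "" ∨ (u ∈ proc ∧ good ws u.toList = true))) →
      (l.foldl pvBStep (built, a)).2 = GB (pBb ws) l a := by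
  intro l
  induction l with
  | nil => intro proc built a _ _; rfl
  | cons w t ih =>
    intro proc built a hsl hb
    have hwmem : w ∈ ws := by
      have hmem : w ∈ sortedW ws := by
        rw [hsl]; exact List.mem_append_right _ List.mem_cons_self
      exact (mem_sortedW ws w).mp hmem
    have hcontains : PySem.Set.contains built (pvDropLast w) = pBb ws w := by
      apply bool_eq_of_iff
      rw [PySem.Set.contains_iff, hb]
      rcases hd : w.toList.dropLast with _ | ⟨e, es⟩
      · have hdw : pvDropLast w = "" := eq_empty_of_toList_nil (by rw [toList_pvDropLast, hd])
        rw [hdw]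
        unfold pBb
        rw [hd, good]
        simp
      · have hdw : (pvDropLast w).toList = e :: es := by rw [toList_pvDropLast, hd]
        have hdne : pvDropLast w ≠ "" := by
          intro h
          rw [h] at hdw
          exact absurd hdw (by simp)
        have hwne : w.toList ≠ [] := by
          intro h
          rw [h] at hd
          exact absurd hd (by simp)
        unfold pBb
        rw [hd]
        constructor
        · rintro (h | ⟨_, hg⟩)
          · exact absurd h hdne
          · rw [hdw] at hg
            exact hg
        · intro hg
          have hg' : good ws (pvDropLast w).toList = true := by rw [hdw]; exact hg
          have hdmem : pvDropLast w ∈ ws := mem_of_good (by rw [hdw]; simp) hg'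
          have hdsorted : pvDropLast w ∈ proc ++ w :: t := by
            rw [← hsl]
            exact (mem_sortedW ws _).mpr hdmem
          have hlt : (pvDropLast w).toList < w.toList := by
            rw [hdw, ← hd]
            exact dropLast_lt_self _ hwne
          have hpw : ∀ x ∈ t, w.toList ≤ x.toList := by
            have hp := sortedW_pairwise ws
            rw [hsl] at hp
            exact (List.pairwise_cons.mp (List.pairwise_append.mp hp).2.1).1
          have hproc : pvDropLast w ∈ proc := by
            rcases List.mem_append.mp hdsorted with h | h
            · exact h
            · rcases List.mem_cons.mp h with h | h
              · rw [h] at hlt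
                exact absurd hlt (lt_irrefl _)
              · exact absurd (lt_of_lt_of_le hlt (hpw _ h)) (lt_irrefl _)
          exact Or.inr ⟨hproc, hg'⟩
    rw [List.foldl_cons]
    have hstep : pvBStep (built, a) w =
        (if pBb ws w = true then
          (PySem.Set.add built w, if PySem.Str.len a < PySem.Str.len w then w else a)
        else (built, a)) := by
      unfold pvBStep
      dsimp only
      rw [hcontains]
    rw [hstep, GB_cons]
    have hlen_iff : (PySem.Str.len a < PySem.Str.len w) ↔ (lenN a < lenN w) := by
      rw [PySem.Str.len_eq, PySem.Str.len_eq]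
      unfold lenN
      exact_mod_cast Iff.rfl
    by_cases hp : pBb ws w = true
    · rw [if_pos hp, if_pos hp]
      have ha' : (if PySem.Str.len a < PySem.Str.len w then w else a)
          = (if lenN a < lenN w then w else a) := if_congr hlen_iff rfl rfl
      rw [ha']
      apply ih (proc ++ [w])
      · rw [hsl]
        simp
      · intro u
        rw [PySem.Set.mem_add, hb]
        have hgw : good ws w.toList = true := by
          rcases hwl : w.toList with _ | ⟨c, cs⟩
          · rw [good]
          · rw [good_nonempty_iff]
            refine ⟨⟨w, hwmem, hwl⟩, ?_⟩
            unfold pBb at hp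
            rw [hwl] at hp
            exact hp
        constructor
        · rintro ((h | ⟨h1, h2⟩) | rfl)
          · exact Or.inl h
          · exact Or.inr ⟨List.mem_append_left _ h1, h2⟩
          · exact Or.inr ⟨List.mem_append_right _ List.mem_cons_self, hgw⟩
        · rintro (rfl | ⟨h1, h2⟩)
          · exact Or.inl (Or.inl rfl)
          · rcases List.mem_append.mp h1 with h | h
            · exact Or.inl (Or.inr ⟨h, h2⟩)
            · exact Or.inr (List.mem_singleton.mp h)
    · rw [if_neg hp, if_neg hp]
      apply ih (proc ++ [w])
      · rw [hsl]
        simp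
      · intro u
        rw [hb]
        constructor
        · rintro (h | ⟨h1, h2⟩)
          · exact Or.inl h
          · exact Or.inr ⟨List.mem_append_left _ h1, h2⟩
        · rintro (rfl | ⟨h1, h2⟩)
          · exact Or.inl rfl
          · rcases List.mem_append.mp h1 with h | h
            · exact Or.inr ⟨h, h2⟩
            · -- u = w but the check failed: w would have to be good, contradiction
              have hu : u = w := List.mem_singleton.mp h
              subst hu
              rcases hul : u.toList with _ | ⟨c, cs⟩
              · exact Or.inl (eq_empty_of_toList_nil hul)
              · exfalso
                rw [hul, good_nonempty_iff] at h2
                apply hp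
                unfold pBb
                rw [hul]
                exact h2.2

theorem B_eq (ws : List String) :
    longestWord3_alt ws = GB (pBb ws) (sortedW ws) "" := by
  unfold longestWord3_alt
  refine Bfold ws (sortedW ws) [] (PySem.Set.ofList [""]) "" (by rw [List.nil_append]) ?_
  intro u
  rw [PySem.Set.mem_ofList, List.mem_singleton]
  constructor
  · intro h
    exact Or.inl h
  · rintro (h | ⟨h, _⟩)
    · exact h
    · cases h

-- ---------- combining: both results are the Btr-minimum of the good words ----------

theorem good_of_pAb {ws : List String} {u : String} (h : pAb ws u = true) :
    good ws u.toList = true := by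
  unfold pAb at h
  rcases h' : good ws u.toList
  · rw [h'] at h
    simp at h
  · rfl

theorem pAb_of_good {ws : List String} {u : String} (hne : u ≠ "")
    (hg : good ws u.toList = true) : pAb ws u = true := by
  unfold pAb
  rw [hg]
  simp [toList_ne_nil_of_ne_empty hne]

theorem hA_mem (ws : List String) (hpre : ∀ w ∈ ws, lenN w ≤ 30) :
    GoodW ws (FA (LA ws 30) "") := by
  rcases FA_mem (LA ws 30) "" with h | h
  · exact Or.inl h
  · rcases (mem_LA30 ws hpre _).mp h with ⟨h1, h2⟩
    exact Or.inr ⟨h1, good_of_pAb h2⟩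

theorem hA_min (ws : List String) (hpre : ∀ w ∈ ws, lenN w ≤ 30) :
    ∀ x, GoodW ws x → ¬ Btr x (FA (LA ws 30) "") := by
  rintro x (rfl | ⟨hxm, hg⟩)
  · exact not_Btr_empty _
  · by_cases hx : x = ""
    · subst hx
      exact not_Btr_empty _
    · exact FA_not_better (LA ws 30) "" x
        (Or.inl ((mem_LA30 ws hpre x).mpr ⟨hxm, pAb_of_good hx hg⟩))

theorem good_of_pBb {ws : List String} {u : String} (hm : u ∈ ws) (h : pBb ws u = true) :
    good ws u.toList = true := by
  rcases hul : u.toList with _ | ⟨c, cs⟩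
  · rw [good]
  · rw [good_nonempty_iff]
    refine ⟨⟨u, hm, hul⟩, ?_⟩
    unfold pBb at h
    rw [hul] at h
    exact h

theorem pBb_of_good {ws : List String} {u : String} (hg : good ws u.toList = true) :
    pBb ws u = true := by
  unfold pBb
  rcases hul : u.toList with _ | ⟨c, cs⟩
  · rw [List.dropLast_nil, good]
  · rw [hul] at hg
    exact ((good_nonempty_iff ws c cs).mp hg).2

theorem hB_mem (ws : List String) : GoodW ws (GB (pBb ws) (sortedW ws) "") := by
  rcases GB_mem (pBb ws) (sortedW ws) "" with h | ⟨h1, h2⟩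
  · exact Or.inl h
  · have hm := (mem_sortedW ws _).mp h1
    exact Or.inr ⟨hm, good_of_pBb hm h2⟩

theorem hB_min (ws : List String) :
    ∀ x, GoodW ws x → ¬ Btr x (GB (pBb ws) (sortedW ws) "") := by
  rintro x (rfl | ⟨hxm, hg⟩)
  · exact not_Btr_empty _
  · have hxs : x ∈ sortedW ws := (mem_sortedW ws x).mpr hxm
    have hpx : pBb ws x = true := pBb_of_good hg
    rintro (h | ⟨h1, h2⟩)
    · exact absurd h (not_lt.mpr (GB_maxlen (pBb ws) (sortedW ws) "" x hxs hpx))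
    · exact GB_lexmin (pBb ws) (sortedW ws) "" (sortedW_pairwise ws)
        (fun y _ _ _ => List.not_lt_nil _) x hxs hpx h1 h2

theorem AB_eq (ws : List String) (hpre : ∀ w ∈ ws, lenN w ≤ 30) :
    FA (LA ws 30) "" = GB (pBb ws) (sortedW ws) "" :=
  Btr_conn (hB_min ws _ (hA_mem ws hpre)) (hA_min ws hpre _ (hB_mem ws))

-- ===== VERDICT (by name: the statement is the Claim_ definition above) =====
theorem longestWord3_spec : Claim_equal_longestWord3 := by
  intro words _ hpre
  unfold Spec_longestWord3
  rw [A_eq words hpre, B_eq words, AB_eq words hpre]
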